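-- pv_equiv track=rewrite | github.com/Konrad22/KryptoLAB | U05_AESKeyGen/modi.py | block_partition_128
-- ===== SOURCE A (Python) =====
-- import math as m
--
-- def add_x_bytes(message, x):
--     zero_bytes = [0]*x
--     return message + zero_bytes
--
-- def block_partition_128(message):
--     l = len(message)
--     partitions_number = m.ceil(l/16)
--     b = l/16
--     if partitions_number > b:
--         message = add_x_bytes(message, 16*partitions_number - l)
--     partitions = [None]*partitions_number
--     for i in range(partitions_number):
--         partitions[i] = message[i*16: (i+1)*16]
--     return partitions
-- ===== SOURCE B (Python) =====
-- def block_partition_128(message):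
--     partitions = []
--     current = []
--     for byte in message:
--         current.append(byte)
--         if len(current) == 16:
--             partitions.append(current)
--             current = []
--     if current:
--         current.extend([0] * (16 - len(current)))
--         partitions.append(current)
--     return partitions
-- ===== Notes on version B (the rewrite author's own statement) =====
-- stated objective: alternative
-- what changed: B makes a single element-wise pass with an accumulator, starting a fresh block each time 16 bytes have been collected and zero-padding whatever remains in the accumulator, instead of A's compute-ceil, pad-the-whole-message-then-index-slice strategy; there is no length arithmetic and no slicing in B.
import Mathlib
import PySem

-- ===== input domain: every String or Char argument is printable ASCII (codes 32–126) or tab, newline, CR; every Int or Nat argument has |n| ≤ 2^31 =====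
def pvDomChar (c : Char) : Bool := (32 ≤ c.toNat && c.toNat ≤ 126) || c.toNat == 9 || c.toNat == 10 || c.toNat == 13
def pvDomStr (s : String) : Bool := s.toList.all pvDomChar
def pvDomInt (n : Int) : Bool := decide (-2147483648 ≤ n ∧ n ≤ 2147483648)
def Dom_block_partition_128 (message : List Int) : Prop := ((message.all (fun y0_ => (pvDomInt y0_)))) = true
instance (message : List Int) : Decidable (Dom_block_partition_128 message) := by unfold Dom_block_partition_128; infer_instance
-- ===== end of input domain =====

-- B makes one element-wise pass with a block accumulator (flush at 16, zero-pad the leftover) instead of A's pad-everything-then-index-slice; return values proved equal.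
-- ===== PORT A =====
-- math.ceil(l/16) on a Nat list length is exactly (l + 15) / 16; the float division l/16 in
-- 'partitions_number > b' is exact here, and the comparison holds iff 16 * partitions_number > l.
-- Slices have nonnegative in-range bounds, so take/drop is exact.
def add_x_bytes (message : List Int) (x : Nat) : List Int :=
  message ++ List.replicate x 0

def block_partition_128 (message : List Int) : List (List Int) :=
  let l := message.length
  let partitions_number := (l + 15) / 16
  let message := if 16 * partitions_number > l then add_x_bytes message (16 * partitions_number - l) else message
  (List.range partitions_number).map (fun i => (message.drop (16 * i)).take 16)

-- ===== PORT B =====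
-- the loop body of Source B: append the byte to the current block; flush it when it reaches 16
def bpStep (st : List (List Int) × List Int) (byte : Int) : List (List Int) × List Int :=
  let current := st.2 ++ [byte]
  if current.length == 16 then (st.1 ++ [current], []) else (st.1, current)

def block_partition_128_alt (message : List Int) : List (List Int) :=
  let st := message.foldl bpStep ([], [])
  if st.2 ≠ [] then st.1 ++ [st.2 ++ List.replicate (16 - st.2.length) 0] else st.1

-- ===== PRECONDITION & SPEC =====
def Spec_block_partition_128 (message : List Int) (out : List (List Int)) : Prop := out = block_partition_128_alt message
instance (message : List Int) (out : List (List Int)) : Decidable (Spec_block_partition_128 message out) := by unfold Spec_block_partition_128; infer_instance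

-- ===== CLAIM (what is proved, stated in full; the proofs are below) =====
def Claim_equal_block_partition_128 : Prop := ∀ (message : List Int), Dom_block_partition_128 message → Spec_block_partition_128 message (block_partition_128 message)

-- ===== LEMMAS AND PROOFS =====

-- Both ports are proved equal to this recursive chunk-and-pad-the-tail normal form.
def chunkPad (m : List Int) : List (List Int) :=
  if h : m = [] then []
  else
    if hr : m.drop 16 = [] then [m.take 16 ++ List.replicate (16 - (m.take 16).length) 0]
    else m.take 16 :: chunkPad (m.drop 16)
termination_by m.length
decreasing_by
  have := List.length_pos_of_ne_nil h
  simp [List.length_drop]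
  omega

-- A's padded message equals m ++ zeros(16p - l) unconditionally (the pad is empty when 16 | l).
theorem A_padded (m : List Int) :
    block_partition_128 m =
      (List.range ((m.length + 15) / 16)).map
        (fun i => (((m ++ List.replicate (16 * ((m.length + 15) / 16) - m.length) 0)).drop (16 * i)).take 16) := by
  unfold block_partition_128 add_x_bytes
  by_cases h : 16 * ((m.length + 15) / 16) > m.length
  · simp [h]
  · have h16 : 16 * ((m.length + 15) / 16) = m.length := by omega
    simp [h16]

theorem A_cons (m : List Int) (hl : 16 < m.length) :
    block_partition_128 m = m.take 16 :: block_partition_128 (m.drop 16) := by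
  rw [A_padded m, A_padded (m.drop 16)]
  have hlen : (m.drop 16).length = m.length - 16 := by simp
  have hp : (m.length + 15) / 16 = ((m.drop 16).length + 15) / 16 + 1 := by
    rw [hlen]; omega
  have hpad : 16 * ((m.length + 15) / 16) - m.length
      = 16 * (((m.drop 16).length + 15) / 16) - (m.drop 16).length := by
    rw [hlen]; omega
  rw [hp, List.range_succ_eq_map, List.map_cons]
  congr 1
  · rw [Nat.mul_zero, List.drop_zero, List.take_append_of_le_length (by omega)]
  · rw [List.map_map]
    apply List.map_congr_left
    intro i _
    have hdd : ((m ++ List.replicate (16 * (((m.drop 16).length + 15) / 16 + 1) - m.length) 0).drop (16 * (i + 1)))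
        = (((m ++ List.replicate (16 * (((m.drop 16).length + 15) / 16 + 1) - m.length) 0).drop 16).drop (16 * i)) := by
      rw [List.drop_drop]; ring_nf
    simp only [Function.comp_apply, Nat.succ_eq_add_one, hdd]
    rw [List.drop_append_of_le_length (by omega)]
    congr 2
    rw [← hp, hpad]

theorem a_eq_chunk (m : List Int) : block_partition_128 m = chunkPad m := by
  by_cases hne : m = []
  · subst hne; simp [block_partition_128, chunkPad]
  · have hl1 : 0 < m.length := List.length_pos_of_ne_nil hne
    by_cases hr : m.drop 16 = []
    · have hl16 : m.length ≤ 16 := by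
        have := List.drop_eq_nil_iff.mp hr; omega
      rw [A_padded m]
      unfold chunkPad
      have hp : (m.length + 15) / 16 = 1 := by omega
      rw [hp]
      simp only [hne, hr, dite_false, List.range_succ, List.range_zero,
        List.nil_append, List.map_cons, List.map_nil, Nat.mul_zero, List.drop_zero]
      have htk : m.take 16 = m := List.take_of_length_le hl16
      rw [htk]
      have hlen2 : (m ++ List.replicate (16 * 1 - m.length) 0).length = 16 := by
        simp; omega
      rw [List.take_of_length_le (le_of_eq hlen2), dif_pos trivial]
    · have hl : 16 < m.length := by
        rcases Nat.lt_or_ge 16 m.length with h | h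
        · exact h
        · exact absurd (List.drop_eq_nil_iff.mpr h) hr
      rw [A_cons m hl, a_eq_chunk (m.drop 16)]
      conv_rhs => unfold chunkPad
      simp [hne, hr]
termination_by m.length
decreasing_by simp; omega

-- the flush step of Source B after the loop, named for the proofs
def bpFinish (st : List (List Int) × List Int) : List (List Int) :=
  if st.2 ≠ [] then st.1 ++ [st.2 ++ List.replicate (16 - st.2.length) 0] else st.1

theorem alt_eq (m : List Int) :
    block_partition_128_alt m = bpFinish (m.foldl bpStep ([], [])) := rfl

theorem bpStep_flush (acc : List (List Int)) (cur : List Int) (b : Int)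
    (h : cur.length = 15) : bpStep (acc, cur) b = (acc ++ [cur ++ [b]], []) := by
  simp [bpStep, h]

theorem bpStep_keep (acc : List (List Int)) (cur : List Int) (b : Int)
    (h : cur.length ≠ 15) : bpStep (acc, cur) b = (acc, cur ++ [b]) := by
  simp [bpStep, h]

-- the fold only appends to the partitions component
theorem fold_absorb (m : List Int) (acc : List (List Int)) (cur : List Int) :
    m.foldl bpStep (acc, cur)
      = (acc ++ (m.foldl bpStep ([], cur)).1, (m.foldl bpStep ([], cur)).2) := by
  induction m generalizing acc cur with
  | nil => simp
  | cons b t ih =>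
      simp only [List.foldl_cons]
      by_cases h : cur.length = 15
      · rw [bpStep_flush acc cur b h, bpStep_flush [] cur b h]
        simp only [List.nil_append]
        rw [ih, ih [cur ++ [b]] []]
        simp
      · rw [bpStep_keep acc cur b h, bpStep_keep [] cur b h]
        exact ih acc (cur ++ [b])

-- a run that never reaches 16 just accumulates
theorem fold_short (m : List Int) (acc : List (List Int)) (cur : List Int)
    (h : cur.length + m.length < 16) :
    m.foldl bpStep (acc, cur) = (acc, cur ++ m) := by
  induction m generalizing acc cur with
  | nil => simp
  | cons b t ih =>
      simp only [List.foldl_cons]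
      have hlt : cur.length ≠ 15 := by simp at h; omega
      rw [bpStep_keep acc cur b hlt, ih acc (cur ++ [b]) (by simp at h ⊢; omega)]
      simp

-- a run that fills exactly to 16 flushes once
theorem fold_full (m : List Int) (acc : List (List Int)) (cur : List Int)
    (h : cur.length + m.length = 16) (hm : m ≠ []) :
    m.foldl bpStep (acc, cur) = (acc ++ [cur ++ m], []) := by
  induction m generalizing acc cur with
  | nil => exact absurd rfl hm
  | cons b t ih =>
      simp only [List.foldl_cons]
      by_cases ht : t = []
      · subst ht
        have h16 : cur.length = 15 := by simp at h; omega
        rw [bpStep_flush acc cur b h16]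
        simp
      · have hlt : cur.length ≠ 15 := by
          have := List.length_pos_of_ne_nil ht
          simp at h; omega
        rw [bpStep_keep acc cur b hlt,
            ih acc (cur ++ [b]) (by simp at h ⊢; omega) ht]
        simp

theorem bpFinish_absorb (acc p : List (List Int)) (c : List Int) :
    bpFinish (acc ++ p, c) = acc ++ bpFinish (p, c) := by
  unfold bpFinish
  by_cases h : c ≠ [] <;> simp [h]

theorem b_eq_chunk (m : List Int) : block_partition_128_alt m = chunkPad m := by
  by_cases hne : m = []
  · subst hne; simp [block_partition_128_alt, chunkPad]
  · have hl1 : 0 < m.length := List.length_pos_of_ne_nil hne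
    by_cases hr : m.drop 16 = []
    · have hl16 : m.length ≤ 16 := by
        have := List.drop_eq_nil_iff.mp hr; omega
      rw [alt_eq]
      unfold chunkPad
      simp only [hne, hr, dite_false, dif_pos trivial]
      have htk : m.take 16 = m := List.take_of_length_le hl16
      rw [htk]
      by_cases hfull : m.length = 16
      · rw [fold_full m [] [] (by simpa using hfull) hne]
        simp [bpFinish, hfull]
      · rw [fold_short m [] [] (by simp; omega)]
        simp [bpFinish, hne]
    · have hl : 16 < m.length := by
        rcases Nat.lt_or_ge 16 m.length with h | h
        · exact h
        · exact absurd (List.drop_eq_nil_iff.mpr h) hr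
      have hsplit : m = m.take 16 ++ m.drop 16 := (List.take_append_drop 16 m).symm
      have htlen : (m.take 16).length = 16 := by simp; omega
      have htne : m.take 16 ≠ [] := by
        intro h; rw [h] at htlen; simp at htlen
      rw [alt_eq]
      conv_lhs => rw [hsplit]
      rw [List.foldl_append, fold_full (m.take 16) [] [] (by simpa using htlen) htne,
          List.nil_append, fold_absorb, bpFinish_absorb, ← alt_eq, b_eq_chunk (m.drop 16)]
      conv_rhs => unfold chunkPad
      simp [hne, hr]
termination_by m.length
decreasing_by simp; omega

-- ===== VERDICT (by name: the statement is the Claim_ definition above) =====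
theorem block_partition_128_spec : Claim_equal_block_partition_128 := by
  intro message _
  unfold Spec_block_partition_128
  rw [a_eq_chunk, b_eq_chunk]
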